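-- pv_equiv track=rewrite | github.com/EnigmaCurry/rigbook-build-test | src/rigbook/routes/adif.py | _parse_segment_value
-- ===== SOURCE A (Python) =====
-- def _parse_segment_value(segment: str, label: str) -> tuple[str, str] | None:
--     """Parse 'Label: first_word remainder' from a segment.
--
--     Returns (first_word, remainder) or None if the segment doesn't match the label.
--     Only the first word is treated as the field value; any trailing text is remainder.
--     """
--     s = segment.strip()
--     for fmt in (f"{label}: ",):
--         if s.startswith(fmt):
--             rest = s[len(fmt) :]
--             parts = rest.split(None, 1)
--             if not parts:
--                 return None
--             return (parts[0], parts[1] if len(parts) > 1 else "")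
--     return None
-- ===== SOURCE B (Python) =====
-- def _parse_segment_value(segment: str, label: str) -> tuple[str, str] | None:
--     """Parse 'Label: first_word remainder' (head-consuming scan, no split)."""
--     s = segment.strip()
--     prefix = label + ": "
--     if not s.startswith(prefix):
--         return None
--     rest = s[len(prefix):].lstrip()
--     if not rest:
--         return None
--     word = []
--     while rest and not rest[0].isspace():
--         word.append(rest[0])
--         rest = rest[1:]
--     return ("".join(word), rest.lstrip())
-- ===== Notes on version B (the rewrite author's own statement) =====
-- stated objective: alternative
-- what changed: Replaces the startswith-tuple loop plus str.split(None,1) with an explicit head-consuming character scan that accumulates the first word and lstrips the tail; no split machinery.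
import Mathlib
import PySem

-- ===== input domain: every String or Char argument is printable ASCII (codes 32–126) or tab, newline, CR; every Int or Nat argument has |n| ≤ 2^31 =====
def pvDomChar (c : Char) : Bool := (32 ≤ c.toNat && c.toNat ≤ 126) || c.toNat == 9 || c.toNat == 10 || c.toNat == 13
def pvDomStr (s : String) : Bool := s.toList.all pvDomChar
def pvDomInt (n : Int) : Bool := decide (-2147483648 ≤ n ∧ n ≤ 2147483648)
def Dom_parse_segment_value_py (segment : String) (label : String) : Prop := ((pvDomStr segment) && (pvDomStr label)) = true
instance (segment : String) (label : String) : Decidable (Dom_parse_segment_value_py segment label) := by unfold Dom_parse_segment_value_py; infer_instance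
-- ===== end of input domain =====

-- B replaces split(None,1) with an explicit head-consuming character scan (alternative decomposition, same cost).

-- ===== PORT A =====
def parse_segment_value_py (segment : String) (label : String) : Option (String × String) :=
  let s := PySem.Chars.strip segment.toList
  let fmt := label.toList ++ (": ".toList)
  if PySem.Chars.startswith s fmt then
    let rest := PySem.Chars.slice s (some (fmt.length : Int)) none
    let parts := PySem.Chars.split₀Max rest 1
    match parts with
    | [] => none
    | [p0] => some (String.mk p0, "")
    | p0 :: p1 :: _ => some (String.mk p0, String.mk p1)
  else none

-- ===== PORT B =====
-- the `while rest and not rest[0].isspace()` loop of Source B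
def pvBScan (word : List Char) : List Char → String × String
  | [] => (String.mk word, "")
  | c :: cs =>
    if PySem.Chars.isspace c then (String.mk word, String.mk (PySem.Chars.lstrip (c :: cs)))
    else pvBScan (word ++ [c]) cs

def parse_segment_value_py_alt (segment : String) (label : String) : Option (String × String) :=
  let s := PySem.Chars.strip segment.toList
  let pre := label.toList ++ (": ".toList)
  if PySem.Chars.startswith s pre then
    let rest := PySem.Chars.lstrip (s.drop pre.length)
    if rest = [] then none
    else some (pvBScan [] rest)
  else none

-- ===== PRECONDITION & SPEC =====
def Spec_parse_segment_value_py (segment : String) (label : String) (out : Option (String × String)) : Prop := out = parse_segment_value_py_alt segment label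
instance (segment : String) (label : String) (out : Option (String × String)) : Decidable (Spec_parse_segment_value_py segment label out) := by unfold Spec_parse_segment_value_py; infer_instance

-- ===== CLAIM (what is proved, stated in full; the proofs are below) =====
def Claim_equal_parse_segment_value_py : Prop := ∀ (segment : String) (label : String), Dom_parse_segment_value_py segment label → Spec_parse_segment_value_py segment label (parse_segment_value_py segment label)

-- ===== LEMMAS AND PROOFS =====

lemma pvBScan_eq (r word : List Char) :
    pvBScan word r =
      (String.mk (word ++ r.takeWhile (fun c => !PySem.Chars.isspace c)),
       String.mk (PySem.Chars.lstrip (r.dropWhile (fun c => !PySem.Chars.isspace c)))) := by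
  have hnil : String.mk [] = "" := rfl
  induction r generalizing word with
  | nil => simp [pvBScan, PySem.Chars.lstrip, hnil]
  | cons c cs ih =>
    by_cases h : PySem.Chars.isspace c
    · simp [pvBScan, h, List.takeWhile, List.dropWhile]
    · simp [pvBScan, h, List.takeWhile, List.dropWhile, ih]

lemma pv_split_eq (cs : List Char) :
    (match PySem.Chars.split₀Max cs 1 with
      | [] => (none : Option (String × String))
      | [p0] => some (String.mk p0, "")
      | p0 :: p1 :: _ => some (String.mk p0, String.mk p1))
    = if PySem.Chars.lstrip cs = [] then none else some (pvBScan [] (PySem.Chars.lstrip cs)) := by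
  have hgo0 : ∀ (n : Nat) (l : List Char) (acc : List (List Char)),
      PySem.Chars.split₀Max.go (n + 1) 0 l acc =
        (match List.dropWhile PySem.Chars.isspace l with
          | [] => acc.reverse
          | l' => (l' :: acc).reverse) := by
    intro n l acc
    rcases hd : List.dropWhile PySem.Chars.isspace l with _ | ⟨a, as⟩ <;>
      simp [PySem.Chars.split₀Max.go, hd]
  have hgo1 : ∀ (n : Nat) (l : List Char) (acc : List (List Char)),
      PySem.Chars.split₀Max.go (n + 1) 1 l acc =
        (match List.dropWhile PySem.Chars.isspace l with
          | [] => acc.reverse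
          | l' =>
            PySem.Chars.split₀Max.go n 0 (List.dropWhile (fun c => !PySem.Chars.isspace c) l')
              (List.takeWhile (fun c => !PySem.Chars.isspace c) l' :: acc)) := by
    intro n l acc
    rcases hd : List.dropWhile PySem.Chars.isspace l with _ | ⟨a, as⟩ <;>
      simp [PySem.Chars.split₀Max.go, hd]
  rcases hr : PySem.Chars.lstrip cs with _ | ⟨c, cs'⟩
  · have : PySem.Chars.split₀Max cs 1 = [] := by
      simp only [PySem.Chars.split₀Max]
      norm_num
      rw [hgo1]
      simp only [PySem.Chars.lstrip] at hr
      simp [hr]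
    simp [this]
  · -- lstrip cs = c :: cs' ≠ []
    have hlen : 1 ≤ cs.length := by
      by_contra h
      have : cs = [] := by cases cs <;> simp_all
      simp [this, PySem.Chars.lstrip] at hr
    obtain ⟨m, hm⟩ : ∃ m, cs.length = m + 1 := ⟨cs.length - 1, by omega⟩
    have hdw : List.dropWhile PySem.Chars.isspace cs = c :: cs' := by
      simpa [PySem.Chars.lstrip] using hr
    have hstep : PySem.Chars.split₀Max cs 1 =
        PySem.Chars.split₀Max.go (m + 1) 0
          (List.dropWhile (fun x => !PySem.Chars.isspace x) (c :: cs'))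
          [List.takeWhile (fun x => !PySem.Chars.isspace x) (c :: cs')] := by
      simp only [PySem.Chars.split₀Max]
      norm_num
      rw [hm, hgo1, hdw]
    rw [hstep, hgo0]
    rcases h2 : List.dropWhile PySem.Chars.isspace
        (List.dropWhile (fun x => !PySem.Chars.isspace x) (c :: cs')) with _ | ⟨d, ds⟩
    · have hnil : String.mk [] = "" := rfl
      rw [pvBScan_eq]
      simp [PySem.Chars.lstrip, h2, hnil]
    · rw [pvBScan_eq]
      simp [PySem.Chars.lstrip, h2]

-- ===== VERDICT (by name: the statement is the Claim_ definition above) =====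
theorem parse_segment_value_py_spec : Claim_equal_parse_segment_value_py := by
  intro segment label _
  unfold Spec_parse_segment_value_py parse_segment_value_py parse_segment_value_py_alt
  simp only
  cases PySem.Chars.startswith (PySem.Chars.strip segment.toList)
      (label.toList ++ (": ".toList)) with
  | false => simp
  | true =>
    simp only [PySem.Chars.slice_eq_listSlice, PySem.List.slice_from_natCast]
    exact pv_split_eq _
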